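-- pv_equiv track=rewrite | github.com/hoichunlaw/EqVolAnalytics | dash_app_v8.py | getTwoClosestValuesFromList
-- ===== SOURCE A (Python) =====
-- def getTwoClosestValuesFromList(ref, lst):
--
--     if ref <= lst[0]:
--         return lst[0], lst[0]
--     elif ref >= lst[-1]:
--         return lst[-1], lst[-1]
--     else:
--         i = 0
--         while ref > lst[i]:
--             i += 1
--
--         return lst[i-1], lst[i]
-- ===== SOURCE B (Python) =====
-- def getTwoClosestValuesFromList(ref, lst):
--     if ref <= lst[0]:
--         return lst[0], lst[0]
--     if ref >= lst[-1]:
--         return lst[-1], lst[-1]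
--     lo, hi = 0, len(lst) - 1
--     while hi - lo > 1:
--         mid = (lo + hi) // 2
--         if lst[mid] < ref:
--             lo = mid
--         else:
--             hi = mid
--     return lst[lo], lst[hi]
-- ===== Notes on version B (the rewrite author's own statement) =====
-- stated objective: faster
-- what changed: Replaces A's linear forward scan with binary search on the interior; Pre_ restricts to nonempty lists that are ascending-sorted or have ref at/beyond an endpoint (binary search needs sortedness to bracket; A raises IndexError on []), excluding unsorted lists with interior ref, where A's scan result is meaningless for a bracketing function.
-- outside the precondition, e.g. on getTwoClosestValuesFromList(5, [1, 10, 2, 3, 20]): A returns (1, 10), B returns (3, 20)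
import Mathlib
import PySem

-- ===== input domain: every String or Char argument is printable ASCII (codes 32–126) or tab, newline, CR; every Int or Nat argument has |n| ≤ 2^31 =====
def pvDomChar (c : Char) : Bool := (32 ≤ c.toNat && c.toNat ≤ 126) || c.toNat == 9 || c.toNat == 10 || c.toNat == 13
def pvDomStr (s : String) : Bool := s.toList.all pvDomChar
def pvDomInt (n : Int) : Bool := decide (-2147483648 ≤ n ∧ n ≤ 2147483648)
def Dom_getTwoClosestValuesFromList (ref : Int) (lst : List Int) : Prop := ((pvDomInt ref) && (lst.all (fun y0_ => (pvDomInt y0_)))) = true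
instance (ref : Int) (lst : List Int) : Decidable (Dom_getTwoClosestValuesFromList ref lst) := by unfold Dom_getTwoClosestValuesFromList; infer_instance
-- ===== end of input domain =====

-- B replaces A's linear forward scan by binary search on the (sorted) list: O(log n) vs O(n).

-- ===== PORT A =====
-- A's 'while ref > lst[i]: i += 1' walking the list from the front; prev carries lst[i-1].
-- (the list is consumed structurally; under A's else-guard the [] case is unreachable)
def pvGoA (ref prev : Int) : List Int → Int × Int
  | [] => (prev, prev)
  | x :: xs => if ref > x then pvGoA ref x xs else (prev, x)

def getTwoClosestValuesFromList (ref : Int) (lst : List Int) : Int × Int :=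
  match lst with
  | [] => (0, 0)  -- Python raises IndexError on lst[0]; excluded by Pre_
  | x :: xs =>
    let last := (x :: xs).getLast (by simp)
    if ref ≤ x then (x, x)
    else if ref ≥ last then (last, last)
    else pvGoA ref last (x :: xs)   -- i = 0; lst[i-1] at i = 0 is lst[-1] = last (unreachable)

-- ===== PORT B =====
-- midpoint of a width->=2 interval lies strictly inside it (used by pvBS's termination)
lemma pvMid_bounds (lo hi : Int) (h : hi - lo > 1) :
    lo < PySem.Int.floordiv (lo + hi) 2 ∧ PySem.Int.floordiv (lo + hi) 2 < hi := by
  have h1 := (PySem.Int.le_floordiv_iff_mul_le (a := lo + hi) (b := 2) (q := lo + 1) (by omega)).2 (by omega)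
  have h2 := (PySem.Int.floordiv_lt_iff_lt_mul (a := lo + hi) (b := 2) (q := hi) (by omega)).2 (by omega)
  exact ⟨by omega, h2⟩

-- Source B's 'while hi - lo > 1' binary-search loop, recursing on the shrinking interval
def pvBS (ref : Int) (lst : List Int) (lo hi : Int) : Int × Int :=
  if h : hi - lo > 1 then
    let mid := PySem.Int.floordiv (lo + hi) 2
    if lst.getD mid.toNat 0 < ref then pvBS ref lst mid hi
    else pvBS ref lst lo mid
  else (lst.getD lo.toNat 0, lst.getD hi.toNat 0)
termination_by (hi - lo).toNat
decreasing_by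
  · have := pvMid_bounds lo hi h
    omega
  · have := pvMid_bounds lo hi h
    omega

def getTwoClosestValuesFromList_alt (ref : Int) (lst : List Int) : Int × Int :=
  match lst with
  | [] => (0, 0)  -- Python raises IndexError on lst[0]; excluded by Pre_
  | x :: xs =>
    let last := (x :: xs).getLast (by simp)
    if ref ≤ x then (x, x)
    else if ref ≥ last then (last, last)
    else pvBS ref (x :: xs) 0 ((x :: xs).length - 1)

-- ===== PRECONDITION & SPEC =====
-- Pre_ excludes [] (A raises IndexError) and the unsorted lists whose interior A's scan
-- actually walks (ref strictly between the endpoints): there a bracketing search is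
-- meaningless and binary search legitimately differs; when ref is at or beyond an
-- endpoint the order of the interior is irrelevant and both ports short-circuit.
def Pre_getTwoClosestValuesFromList (ref : Int) (lst : List Int) : Prop :=
  lst ≠ [] ∧ (List.Pairwise (· ≤ ·) lst ∨ ref ≤ lst.headD 0 ∨ lst.getLastD 0 ≤ ref)
instance (ref : Int) (lst : List Int) : Decidable (Pre_getTwoClosestValuesFromList ref lst) := by unfold Pre_getTwoClosestValuesFromList; infer_instance
def pvWitness_getTwoClosestValuesFromList : Int × List Int := (4, [1, 3, 5, 7])

def Spec_getTwoClosestValuesFromList (ref : Int) (lst : List Int) (out : Int × Int) : Prop := out = getTwoClosestValuesFromList_alt ref lst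
instance (ref : Int) (lst : List Int) (out : Int × Int) : Decidable (Spec_getTwoClosestValuesFromList ref lst out) := by unfold Spec_getTwoClosestValuesFromList; infer_instance

-- ===== CLAIM (what is proved, stated in full; the proofs are below) =====
def Claim_equal_getTwoClosestValuesFromList : Prop := ∀ (ref : Int) (lst : List Int), Dom_getTwoClosestValuesFromList ref lst → Pre_getTwoClosestValuesFromList ref lst → Spec_getTwoClosestValuesFromList ref lst (getTwoClosestValuesFromList ref lst)

-- ===== LEMMAS AND PROOFS =====

-- A's walk in terms of takeWhile/dropWhile of the strict predicate ref > ·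
lemma pvGoA_eq (ref : Int) (lst : List Int) (prev : Int)
    (h : lst.dropWhile (fun v => decide (ref > v)) ≠ []) :
    pvGoA ref prev lst =
      ((lst.takeWhile (fun v => decide (ref > v))).getLastD prev,
       (lst.dropWhile (fun v => decide (ref > v))).headD 0) := by
  induction lst generalizing prev with
  | nil => simp at h
  | cons x xs ih =>
    by_cases hx : ref > x
    · have hd : (x::xs).dropWhile (fun v => decide (ref > v)) = xs.dropWhile (fun v => decide (ref > v)) := by
        simp [List.dropWhile_cons, hx]
      have ht : (x::xs).takeWhile (fun v => decide (ref > v)) = x :: xs.takeWhile (fun v => decide (ref > v)) := by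
        simp [List.takeWhile_cons, hx]
      rw [hd] at h
      simp only [pvGoA]
      rw [if_pos hx, ih x h, ht, hd, List.getLastD_cons]
    · have hd : (x::xs).dropWhile (fun v => decide (ref > v)) = x :: xs := by
        simp [List.dropWhile_cons, hx]
      have ht : (x::xs).takeWhile (fun v => decide (ref > v)) = ([] : List Int) := by
        simp [List.takeWhile_cons, hx]
      simp only [pvGoA]
      rw [if_neg hx, ht, hd]
      simp

-- indices inside takeWhile satisfy the predicate
lemma pvTakeWhile_getD (p : Int → Bool) (lst : List Int) (i : Nat)
    (hi : i < (lst.takeWhile p).length) :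
    p (lst.getD i 0) = true := by
  induction lst generalizing i with
  | nil => simp at hi
  | cons x xs ih =>
    by_cases hx : p x
    · cases i with
      | zero => simpa
      | succ i =>
        rw [List.takeWhile_cons, if_pos hx, List.length_cons] at hi
        exact ih i (by omega)
    · rw [List.takeWhile_cons, if_neg hx] at hi
      simp at hi

-- the head of dropWhile rejects the predicate
lemma pvDropWhile_headD (p : Int → Bool) (lst : List Int)
    (h : lst.dropWhile p ≠ []) :
    p ((lst.dropWhile p).headD 0) = false := by
  induction lst with
  | nil => simp at h
  | cons x xs ih =>
    by_cases hx : p x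
    · rw [List.dropWhile_cons, if_pos hx] at h ⊢
      exact ih h
    · rw [List.dropWhile_cons, if_neg hx]
      simpa using hx

-- the head of dropWhile is the element at index (takeWhile length)
lemma pvDropWhile_getD (p : Int → Bool) (lst : List Int)
    (h : lst.dropWhile p ≠ []) :
    (lst.dropWhile p).headD 0 = lst.getD (lst.takeWhile p).length 0 := by
  induction lst with
  | nil => simp at h
  | cons x xs ih =>
    by_cases hx : p x
    · rw [List.dropWhile_cons, if_pos hx] at h ⊢
      rw [List.takeWhile_cons, if_pos hx, List.length_cons]
      simpa using ih h
    · rw [List.dropWhile_cons, if_neg hx, List.takeWhile_cons, if_neg hx]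
      simp

-- the last element of a nonempty takeWhile is the element just before dropWhile
lemma pvTakeWhile_getLastD (p : Int → Bool) (lst : List Int) (prev : Int)
    (h : lst.takeWhile p ≠ []) :
    (lst.takeWhile p).getLastD prev = lst.getD ((lst.takeWhile p).length - 1) 0 := by
  induction lst generalizing prev with
  | nil => simp at h
  | cons x xs ih =>
    by_cases hx : p x
    · rw [List.takeWhile_cons, if_pos hx] at h ⊢
      rw [List.getLastD_cons, List.length_cons]
      by_cases ht : xs.takeWhile p = []
      · rw [ht]
        simp [ht]
      · rw [ih x ht]
        have hlen : 1 ≤ (xs.takeWhile p).length := by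
          cases hh : xs.takeWhile p with
          | nil => exact absurd hh ht
          | cons a l => simp [hh]
        have : (xs.takeWhile p).length + 1 - 1 = ((xs.takeWhile p).length - 1) + 1 := by omega
        rw [this]
        simp
    · rw [List.takeWhile_cons, if_neg hx] at h
      exact absurd rfl h

-- sortedness at the level of getD
lemma pvSorted_getD (lst : List Int) (hs : List.Pairwise (· ≤ ·) lst)
    (i k : Nat) (hik : i ≤ k) (hk : k < lst.length) :
    lst.getD i 0 ≤ lst.getD k 0 := by
  rw [List.getD_eq_getElem lst 0 (by omega), List.getD_eq_getElem lst 0 hk]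
  rcases Nat.eq_or_lt_of_le hik with rfl | hlt
  · exact le_refl _
  · exact List.pairwise_iff_getElem.1 hs i k (by omega) hk hlt

-- the binary-search loop lands on index j when lo < j ≤ hi brackets the crossover
lemma pvBS_eq (ref : Int) (lst : List Int) (j : Nat)
    (hs : List.Pairwise (· ≤ ·) lst)
    (hq : ref ≤ lst.getD j 0)
    (hmin : ∀ i : Nat, i < j → lst.getD i 0 < ref)
    (hjlen : j < lst.length) :
    ∀ (n : Nat) (lo hi : Int), (hi - lo).toNat = n → 0 ≤ lo → lo.toNat < j → j ≤ hi.toNat → hi.toNat < lst.length →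
    pvBS ref lst lo hi = (lst.getD (j - 1) 0, lst.getD j 0) := by
  intro n
  induction n using Nat.strong_induction_on with
  | _ n ih =>
  intro lo hi hn h0 hlo hhi hhin
  rw [pvBS]
  by_cases hbig : hi - lo > 1
  · rw [dif_pos hbig]
    have hmb := pvMid_bounds lo hi hbig
    set mid := PySem.Int.floordiv (lo + hi) 2 with hmid
    have hm0 : 0 ≤ mid := by omega
    have hmidlen : mid.toNat < lst.length := by omega
    by_cases hc : lst.getD mid.toNat 0 < ref
    · rw [if_pos hc]
      have hmj : mid.toNat < j := by
        by_contra hge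
        have := pvSorted_getD lst hs j mid.toNat (by omega) hmidlen
        omega
      exact ih (hi - mid).toNat (by omega) mid hi rfl hm0 hmj hhi hhin
    · rw [if_neg hc]
      have hjm : j ≤ mid.toNat := by
        by_contra hlt
        exact absurd (hmin mid.toNat (by omega)) (by omega)
      exact ih (mid - lo).toNat (by omega) lo mid rfl h0 hlo hjm hmidlen
  · rw [dif_neg hbig]
    have hj : j = hi.toNat := by omega
    have hl : lo.toNat = j - 1 := by omega
    rw [hl, hj]

-- ===== VERDICT (by name: the statement is the Claim_ definition above) =====
theorem getTwoClosestValuesFromList_spec : Claim_equal_getTwoClosestValuesFromList := by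
  intro ref lst _ hpre
  unfold Spec_getTwoClosestValuesFromList
  obtain ⟨hne, hd⟩ := hpre
  match lst with
  | [] => exact absurd rfl hne
  | x :: xs =>
    simp only [getTwoClosestValuesFromList, getTwoClosestValuesFromList_alt]
    by_cases h1 : ref ≤ x
    · simp [h1]
    · by_cases h2 : ref ≥ (x :: xs).getLast (by simp)
      · simp [h1, h2]
      · simp only [if_neg h1, if_neg h2]
        have hlastD : (x :: xs).getLastD 0 = (x :: xs).getLast (by simp) := by
          rw [List.getLastD_eq_getLast?, List.getLast?_eq_some_getLast (by simp)]
          rfl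
        have hs : List.Pairwise (· ≤ ·) (x :: xs) := by
          rcases hd with hs | hg | hg
          · exact hs
          · exact absurd hg (by simpa using h1)
          · rw [hlastD] at hg; omega
        have hlast_mem : (x :: xs).getLast (by simp) ∈ (x :: xs) := List.getLast_mem _
        have hxlt : x < ref := by omega
        have hlt : ref < (x :: xs).getLast (by simp) := by omega
        have hdne : (x :: xs).dropWhile (fun v => decide (ref > v)) ≠ [] := by
          intro hnil
          have := (List.dropWhile_eq_nil_iff).1 hnil _ hlast_mem
          simp only [decide_eq_true_eq] at this
          omega
        have htne : (x :: xs).takeWhile (fun v => decide (ref > v)) ≠ [] := by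
          rw [List.takeWhile_cons, if_pos (by simpa using hxlt)]
          simp
        have hj1 : 1 ≤ ((x :: xs).takeWhile (fun v => decide (ref > v))).length := by
          cases hh : (x :: xs).takeWhile (fun v => decide (ref > v)) with
          | nil => exact absurd hh htne
          | cons a l => simp [hh]
        have hlensum : ((x :: xs).takeWhile (fun v => decide (ref > v))).length
            + ((x :: xs).dropWhile (fun v => decide (ref > v))).length = (x :: xs).length := by
          rw [← List.length_append, List.takeWhile_append_dropWhile]
        have hdlen : 1 ≤ ((x :: xs).dropWhile (fun v => decide (ref > v))).length := by
          cases hh : (x :: xs).dropWhile (fun v => decide (ref > v)) with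
          | nil => exact absurd hh hdne
          | cons a l => simp [hh]
        have hq : ref ≤ (x :: xs).getD ((x :: xs).takeWhile (fun v => decide (ref > v))).length 0 := by
          have h3 := pvDropWhile_headD (fun v => decide (ref > v)) (x :: xs) hdne
          rw [pvDropWhile_getD (fun v => decide (ref > v)) (x :: xs) hdne] at h3
          simp only [decide_eq_false_iff_not] at h3
          omega
        have hmin : ∀ i : Nat, i < ((x :: xs).takeWhile (fun v => decide (ref > v))).length →
            (x :: xs).getD i 0 < ref := by
          intro i hij
          have := pvTakeWhile_getD (fun v => decide (ref > v)) (x :: xs) i hij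
          simp only [decide_eq_true_eq] at this
          omega
        have hbs := pvBS_eq ref (x :: xs) ((x :: xs).takeWhile (fun v => decide (ref > v))).length
          hs hq hmin (by omega)
          ((((x :: xs).length : Int) - 1) - 0).toNat 0 (((x :: xs).length : Int) - 1)
          rfl (by omega) (by omega) (by omega) (by omega)
        rw [pvGoA_eq ref (x :: xs) _ hdne,
            pvTakeWhile_getLastD (fun v => decide (ref > v)) (x :: xs) _ htne,
            pvDropWhile_getD (fun v => decide (ref > v)) (x :: xs) hdne]
        exact hbs.symm
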